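-- pv_equiv track=rewrite | github.com/nigelp/ai-model-tracker | model_scraper.py | pick_representative_gguf_file
-- ===== SOURCE A (Python) =====
-- def pick_representative_gguf_file(gguf_files):
--     """Pick a representative GGUF file for metadata extraction.
--
--     Prefers Q4_K_M or similar medium quantization for speed.
--     """
--     if not gguf_files:
--         return None
--
--     # Preference order: Q4_K_M > Q4_K_S > Q5_K_M > Q5_K_S > first file
--     preferences = ['q4_k_m', 'q4_k_s', 'q5_k_m', 'q5_k_s', 'q4_0', 'q5_0']
--
--     for pref in preferences:
--         for f in gguf_files:
--             if pref in f.lower():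
--                 return f
--
--     # Return first file if no preference match
--     return gguf_files[0]
-- ===== SOURCE B (Python) =====
-- _PREFERENCES = ['q4_k_m', 'q4_k_s', 'q5_k_m', 'q5_k_s', 'q4_0', 'q5_0']
--
--
-- def _rank(low, prefs):
--     """Smallest preference index whose tag occurs in low, else None."""
--     for i, p in enumerate(prefs):
--         if p in low:
--             return i
--     return None
--
--
-- def pick_representative_gguf_file(gguf_files):
--     """Pick a representative GGUF file for metadata extraction.
--
--     Single pass over the files, keeping the file with the smallest
--     preference rank seen so far (ties broken toward the earlier file).
--     """
--     if not gguf_files: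
--         return None
--     best, best_rank = None, len(_PREFERENCES)
--     for f in gguf_files:
--         r = _rank(f.lower(), _PREFERENCES)
--         if r is not None and r < best_rank:
--             best, best_rank = f, r
--     return best if best is not None else gguf_files[0]
-- ===== Notes on version B (the rewrite author's own statement) =====
-- stated objective: alternative
-- what changed: Replaced A's preference-major nested scan (for each quantization tag, rescan all files) by a single file-major pass that computes each file's minimum preference rank once and keeps the best-ranked earliest file.
import Mathlib
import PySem

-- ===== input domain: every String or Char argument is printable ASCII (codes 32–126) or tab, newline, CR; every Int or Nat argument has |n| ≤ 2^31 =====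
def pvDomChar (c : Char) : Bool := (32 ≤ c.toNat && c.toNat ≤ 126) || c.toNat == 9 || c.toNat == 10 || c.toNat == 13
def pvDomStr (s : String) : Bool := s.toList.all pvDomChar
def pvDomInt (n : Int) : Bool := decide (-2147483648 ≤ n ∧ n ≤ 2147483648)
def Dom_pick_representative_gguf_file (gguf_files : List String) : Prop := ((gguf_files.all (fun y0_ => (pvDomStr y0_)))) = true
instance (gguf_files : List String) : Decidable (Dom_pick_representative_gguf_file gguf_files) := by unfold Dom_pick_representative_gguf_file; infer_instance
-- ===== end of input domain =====

-- B replaces A's preference-major nested scan with a single file-major pass keeping the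
-- best-ranked file (objective: alternative decomposition, same result).


-- ===== PORT A =====
def pvPrefsA : List String := ["q4_k_m", "q4_k_s", "q5_k_m", "q5_k_s", "q4_0", "q5_0"]

-- inner loop: 'for f in gguf_files: if pref in f.lower(): return f'
def pvInner (pref : String) : List String → Option String
  | [] => none
  | f :: fs => if PySem.Str.isIn pref (PySem.Str.lower f) then some f else pvInner pref fs

-- outer loop: 'for pref in preferences: …'
def pvOuter (files : List String) : List String → Option String
  | [] => none
  | p :: ps =>
    match pvInner p files with
    | some f => some f
    | none => pvOuter files ps

def pick_representative_gguf_file (gguf_files : List String) : Option String :=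
  if gguf_files = [] then none
  else
    match pvOuter gguf_files pvPrefsA with
    | some f => some f
    | none => some (PySem.List.pyGetD gguf_files 0 "")

-- ===== PORT B =====
def pvPrefsB : List String := ["q4_k_m", "q4_k_s", "q5_k_m", "q5_k_s", "q4_0", "q5_0"]

-- _rank(low, prefs): smallest index i with prefs[i] in low, else None
def pvRank (low : String) (i : Nat) : List String → Option Nat
  | [] => none
  | p :: ps => if PySem.Str.isIn p low then some i else pvRank low (i + 1) ps

-- the single pass: state (best, best_rank)
def pvBLoop (ps : List String) : List String → Option String → Nat → Option String × Nat
  | [], best, br => (best, br)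
  | f :: fs, best, br =>
    match pvRank (PySem.Str.lower f) 0 ps with
    | some r => if r < br then pvBLoop ps fs (some f) r else pvBLoop ps fs best br
    | none => pvBLoop ps fs best br

def pick_representative_gguf_file_alt (gguf_files : List String) : Option String :=
  if gguf_files = [] then none
  else
    match (pvBLoop pvPrefsB gguf_files none pvPrefsB.length).1 with
    | some f => some f
    | none => some (PySem.List.pyGetD gguf_files 0 "")

-- ===== PRECONDITION & SPEC =====
def Spec_pick_representative_gguf_file (gguf_files : List String) (out : Option String) : Prop := out = pick_representative_gguf_file_alt gguf_files
instance (gguf_files : List String) (out : Option String) : Decidable (Spec_pick_representative_gguf_file gguf_files out) := by unfold Spec_pick_representative_gguf_file; infer_instance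

-- ===== CLAIM (what is proved, stated in full; the proofs are below) =====
def Claim_equal_pick_representative_gguf_file : Prop := ∀ (gguf_files : List String), Dom_pick_representative_gguf_file gguf_files → Spec_pick_representative_gguf_file gguf_files (pick_representative_gguf_file gguf_files)

-- ===== LEMMAS AND PROOFS =====

-- rank of a (lowered) filename relative to a preference list: index of the first
-- preference it contains, ps.length if it contains none.
def pvRk (low : String) : List String → Nat
  | [] => 0
  | p :: ps => if PySem.Str.isIn p low then 0 else pvRk low ps + 1

-- minimum rank over a list of files (default: ps.length)
def pvMv (ps : List String) (files : List String) : Nat :=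
  files.foldr (fun f m => min (pvRk (PySem.Str.lower f) ps) m) ps.length

theorem pvRk_le (low : String) (ps : List String) : pvRk low ps ≤ ps.length := by
  induction ps with
  | nil => simp [pvRk]
  | cons p ps ih => simp only [pvRk, List.length_cons]; split <;> omega

theorem pvRank_eq (low : String) (ps : List String) : ∀ i : Nat,
    pvRank low i ps = if pvRk low ps < ps.length then some (i + pvRk low ps) else none := by
  induction ps with
  | nil => intro i; simp [pvRank, pvRk]
  | cons p ps ih =>
    intro i
    by_cases h : PySem.Str.isIn p low = true
    · simp only [pvRank, pvRk, h]
      simp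
    · simp only [pvRank, pvRk, h, if_false, Bool.false_eq_true, ih (i + 1), List.length_cons]
      by_cases hlt : pvRk low ps < ps.length
      · simp only [hlt, if_true, if_pos (by omega : pvRk low ps + 1 < ps.length + 1)]
        congr 1; omega
      · simp [hlt]

theorem pv_find?_congr_mem {α : Type} (l : List α) (p q : α → Bool)
    (h : ∀ x ∈ l, p x = q x) : l.find? p = l.find? q := by
  induction l with
  | nil => rfl
  | cons a l ih =>
    simp only [List.find?_cons, h a (by simp)]
    cases q a <;> simp_all

theorem pvInner_eq_find? (p : String) (files : List String) :
    pvInner p files = files.find? (fun f => PySem.Str.isIn p (PySem.Str.lower f)) := by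
  induction files with
  | nil => rfl
  | cons f fs ih =>
    simp only [pvInner, List.find?_cons, ih]
    split <;> simp_all

theorem pvMv_zero_of_mem (ps : List String) (files : List String) (f : String)
    (hf : f ∈ files) (h0 : pvRk (PySem.Str.lower f) ps = 0) : pvMv ps files = 0 := by
  induction files with
  | nil => cases hf
  | cons g fs ih =>
    rcases List.mem_cons.mp hf with rfl | hm
    · simp [pvMv, h0]
    · simp only [pvMv, List.foldr_cons]
      have := ih hm
      simp only [pvMv] at this
      omega

theorem pvMv_cons_none (p : String) (ps : List String) (files : List String)
    (h : ∀ f ∈ files, ¬ PySem.Str.isIn p (PySem.Str.lower f) = true) :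
    pvMv (p :: ps) files = pvMv ps files + 1 := by
  induction files with
  | nil => simp [pvMv]
  | cons f fs ih =>
    have hf : PySem.Str.isIn p (PySem.Str.lower f) = false := by
      have := h f (by simp); simpa using this
    simp only [pvMv, List.foldr_cons] at *
    rw [ih (fun g hg => h g (by simp [hg]))]
    simp only [pvRk, hf, Bool.false_eq_true, if_false]
    omega

theorem pvOuter_char (ps : List String) : ∀ files : List String,
    pvOuter files ps =
      if pvMv ps files < ps.length then
        files.find? (fun f => pvRk (PySem.Str.lower f) ps == pvMv ps files)
      else none := by
  induction ps with
  | nil => intro files; simp [pvOuter]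
  | cons p ps ih =>
    intro files
    simp only [pvOuter, pvInner_eq_find?]
    cases hfind : files.find? (fun f => PySem.Str.isIn p (PySem.Str.lower f)) with
    | some f =>
      have hmem := List.mem_of_find?_eq_some hfind
      have hp : PySem.Str.isIn p (PySem.Str.lower f) = true := by
        have := List.find?_some hfind; simpa using this
      have h0 : pvRk (PySem.Str.lower f) (p :: ps) = 0 := by
        simp only [pvRk, hp]
        rfl
      have hM : pvMv (p :: ps) files = 0 := pvMv_zero_of_mem _ _ f hmem h0
      rw [hM]
      rw [if_pos (by simp)]
      have : (fun f => pvRk (PySem.Str.lower f) (p :: ps) == 0)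
           = (fun f => PySem.Str.isIn p (PySem.Str.lower f)) := by
        funext g; simp only [pvRk]; split <;> simp_all
      rw [this, hfind]
    | none =>
      have hnone : ∀ f ∈ files, ¬ PySem.Str.isIn p (PySem.Str.lower f) = true := by
        intro f hf
        have := List.find?_eq_none.mp hfind f hf
        simpa using this
      have hM : pvMv (p :: ps) files = pvMv ps files + 1 := pvMv_cons_none p ps files hnone
      rw [hM, ih files]
      simp only [List.length_cons]
      by_cases hc : pvMv ps files < ps.length
      · rw [if_pos hc, if_pos (by omega)]
        apply pv_find?_congr_mem
        intro f hf
        have hfp : PySem.Str.isIn p (PySem.Str.lower f) = false := by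
          have := hnone f hf; simpa using this
        simp only [pvRk, hfp, Bool.false_eq_true, if_false]
        have : (pvRk (PySem.Str.lower f) ps + 1 == pvMv ps files + 1)
             = (pvRk (PySem.Str.lower f) ps == pvMv ps files) := by
          by_cases h : pvRk (PySem.Str.lower f) ps = pvMv ps files
          · simp [h]
          · simp
        rw [this]
      · rw [if_neg hc, if_neg (by omega)]

theorem pvBLoop_char (ps : List String) : ∀ (files : List String) (best : Option String) (br : Nat),
    br ≤ ps.length →
    pvBLoop ps files best br =
      if pvMv ps files < br then
        (files.find? (fun f => pvRk (PySem.Str.lower f) ps == pvMv ps files), pvMv ps files)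
      else (best, br) := by
  intro files
  induction files with
  | nil =>
    intro best br hbr
    simp only [pvBLoop, pvMv, List.foldr_nil]
    rw [if_neg (by omega)]
  | cons f fs ih =>
    intro best br hbr
    have hMc : pvMv ps (f :: fs) = min (pvRk (PySem.Str.lower f) ps) (pvMv ps fs) := by
      simp [pvMv]
    simp only [pvBLoop, pvRank_eq]
    by_cases hr : pvRk (PySem.Str.lower f) ps < ps.length
    · rw [if_pos hr]
      simp only [Nat.zero_add]
      by_cases hbru : pvRk (PySem.Str.lower f) ps < br
      · rw [if_pos hbru, ih (some f) _ (by omega)]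
        by_cases h2 : pvMv ps fs < pvRk (PySem.Str.lower f) ps
        · rw [if_pos h2, hMc, if_pos (by omega)]
          rw [min_eq_right (by omega), List.find?_cons_of_neg]
          simp; omega
        · rw [if_neg h2, hMc, min_eq_left (by omega), if_pos hbru]
          rw [List.find?_cons_of_pos]
          simp
      · rw [if_neg hbru, ih best br hbr]
        by_cases h2 : pvMv ps fs < br
        · rw [if_pos h2, hMc, min_eq_right (by omega), if_pos h2]
          rw [List.find?_cons_of_neg]
          simp; omega
        · rw [if_neg h2, hMc, if_neg (by omega)]
    · rw [if_neg hr]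
      have hreq : pvRk (PySem.Str.lower f) ps = ps.length := by
        have := pvRk_le (PySem.Str.lower f) ps; omega
      rw [ih best br hbr]
      by_cases h2 : pvMv ps fs < br
      · rw [if_pos h2, hMc, min_eq_right (by omega), if_pos h2]
        rw [List.find?_cons_of_neg]
        simp; omega
      · rw [if_neg h2, hMc, if_neg (by omega)]

-- ===== VERDICT (by name: the statement is the Claim_ definition above) =====
theorem pick_representative_gguf_file_spec : Claim_equal_pick_representative_gguf_file := by
  intro files _
  unfold Spec_pick_representative_gguf_file
  unfold pick_representative_gguf_file pick_representative_gguf_file_alt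
  by_cases h : files = []
  · simp [h]
  · rw [if_neg h, if_neg h]
    have hPB : pvPrefsB = pvPrefsA := rfl
    rw [hPB, pvBLoop_char pvPrefsA files none pvPrefsA.length (le_refl _),
        pvOuter_char pvPrefsA files]
    by_cases hc : pvMv pvPrefsA files < pvPrefsA.length
    · rw [if_pos hc, if_pos hc]
    · rw [if_neg hc, if_neg hc]
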